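-- pv_equiv track=rewrite | github.com/charapennikaurm/BSU | Алгоритмы и структуры данных/Recurrent Relations/solution.py | restore_word
-- ===== SOURCE A (Python) =====
-- def restore_word(dp, min_words, words):
--     result = ''
--     i = len(dp[0]) - 1
--     j = len(words) - 1
--     while j >= 0 and i > 0:
--         if dp[j][i] == min_words[i]:
--             result = words[j] + ' ' + result
--             i -= len(words[j])
--             j = len(words) - 1
--         else:
--             j -= 1
--     return result.strip()
-- ===== SOURCE B (Python) =====
-- def _choice(dp, min_words, m, i):
--     for j in range(m - 1, -1, -1):
--         if dp[j][i] == min_words[i]: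
--             return j
--     return None
--
--
-- def restore_word(dp, min_words, words):
--     n = len(dp[0])
--     m = len(words)
--     choice = [None] + [_choice(dp, min_words, m, i) for i in range(1, n)]
--     parts = []
--     i = n - 1
--     while i > 0 and choice[i] is not None:
--         w = words[choice[i]]
--         parts.append(w)
--         i -= len(w)
--     return ' '.join(reversed(parts)).strip()
-- ===== Notes on version B (the rewrite author's own statement) =====
-- stated objective: alternative
-- what changed: B first precomputes a parent-pointer table choice[i] (last word index j whose dp[j][i] hits min_words[i]) for every position, then reconstructs by a simple chain walk collecting words into a list joined once, instead of A's interleaved top-down rescans with quadratic string prepending.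
-- outside the precondition, e.g. on restore_word([[5, 5], [7], [0, 9]], [0, 9], ['a', 'b', 'cd']): A returns 'cd', B returns 'cd'; on restore_word([[0, 1], [0, 1]], [0, 9], ['a', '']): A returns '', B returns ''
import Mathlib
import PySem

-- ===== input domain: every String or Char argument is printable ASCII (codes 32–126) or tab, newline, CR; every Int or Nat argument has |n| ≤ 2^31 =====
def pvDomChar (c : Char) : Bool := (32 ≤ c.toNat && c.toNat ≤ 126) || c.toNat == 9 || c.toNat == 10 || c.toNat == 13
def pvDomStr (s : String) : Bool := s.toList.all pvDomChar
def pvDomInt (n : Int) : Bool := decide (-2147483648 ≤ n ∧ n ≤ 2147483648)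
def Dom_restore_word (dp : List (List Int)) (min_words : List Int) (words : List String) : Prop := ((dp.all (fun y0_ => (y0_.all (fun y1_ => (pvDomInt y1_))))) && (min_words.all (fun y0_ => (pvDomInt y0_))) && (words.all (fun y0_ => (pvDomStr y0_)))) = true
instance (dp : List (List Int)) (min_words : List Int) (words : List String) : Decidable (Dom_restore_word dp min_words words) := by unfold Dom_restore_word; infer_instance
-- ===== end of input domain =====

-- B replaces A's interleaved top-down rescans and quadratic string prepending by a precomputed
-- parent-pointer table followed by a chain walk whose collected words are joined once (alternative decomposition).


-- ===== PORT A =====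

-- dp[j][i] for Int indices: none = IndexError (both ports use it the same way)
def pvG2 (dp : List (List Int)) (j i : Int) : Option Int :=
  (PySem.List.pyGet? dp j).bind (fun row => PySem.List.pyGet? row i)

-- A's while loop.  jN encodes Python's j as jN = j+1 (jN = 0 ↔ j = -1, loop exit); fuel is a port
-- artifact consumed only when a word is matched (i then drops by len(words[j]) ≥ 1 inside Pre_,
-- so fuel = len(dp[0]) suffices on every input Python terminates on inside Pre_).
def restore_word_loop (dp : List (List Int)) (min_words : List Int) (words : List String) :
    Nat → Int → Nat → String → String
  | _, _, 0, result => result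
  | fuel, i, jN+1, result =>
    if 0 < i then
      if pvG2 dp (jN : Int) i = PySem.List.pyGet? min_words i then
        match fuel, PySem.List.pyGet? words (jN : Int) with
        | f+1, some w =>
            restore_word_loop dp min_words words f (i - PySem.Str.len w) words.length
              (w ++ " " ++ result)
        | _, _ => result       -- fuel out (Python still running) or IndexError: outside Pre_
      else restore_word_loop dp min_words words fuel i jN result
    else result
  termination_by fuel _ jN => (fuel, jN)

def restore_word (dp : List (List Int)) (min_words : List Int) (words : List String) : String :=
  match dp with
  | [] => ""                    -- dp[0] raises IndexError; outside Pre_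
  | row0 :: _ =>
      PySem.Str.strip
        (restore_word_loop dp min_words words row0.length ((row0.length : Int) - 1)
          words.length "")

-- ===== PORT B =====

-- Source B's _choice: first j in range(m-1, -1, -1) with dp[j][i] == min_words[i]
def pvChoiceAt (dp : List (List Int)) (min_words : List Int) (m : Nat) (i : Int) : Option Int :=
  List.find? (fun j => decide (pvG2 dp j i = PySem.List.pyGet? min_words i))
    (PySem.List.pyRange ((m : Int) - 1) (-1) (-1))

-- Source B's reconstruction walk; fuel = n suffices inside Pre_ for the same reason as in port A
def restore_word_walk (words : List String) (choice : List (Option Int)) :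
    Nat → Int → List String → List String
  | 0, _, parts => parts
  | f+1, i, parts =>
    if 0 < i then
      match PySem.List.pyGet? choice i with
      | some (some j) =>
        match PySem.List.pyGet? words j with
        | some w => restore_word_walk words choice f (i - PySem.Str.len w) (parts ++ [w])
        | none => parts         -- IndexError: outside Pre_
      | _ => parts              -- choice[i] is None (or IndexError, unreachable)
    else parts

def restore_word_alt (dp : List (List Int)) (min_words : List Int) (words : List String) : String :=
  match dp with
  | [] => ""                    -- dp[0] raises IndexError; outside Pre_
  | row0 :: _ =>
      let n := row0.length
      let choice : List (Option Int) :=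
        (none : Option Int) :: (PySem.List.pyRange 1 (n : Int) 1).map (pvChoiceAt dp min_words words.length)
      PySem.Str.strip
        (PySem.Str.join " " (restore_word_walk words choice n ((n : Int) - 1) []).reverse)

-- ===== PRECONDITION & SPEC =====
-- Pre_ excludes inputs where A raises (empty dp; a dp row or min_words too short; more words than dp
-- rows) or loops forever (an empty word that matches).  The shape check is slightly conservative: it
-- also excludes some ragged or empty-word inputs on which A happens to return '' before reaching the
-- bad index (see the cited examples; B returns the same '' there).
def Pre_restore_word (dp : List (List Int)) (min_words : List Int) (words : List String) : Prop :=
  dp ≠ [] ∧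
    ((dp.headD []).length ≤ 1 ∨ words = [] ∨
      (words.length ≤ dp.length ∧ (dp.headD []).length ≤ min_words.length ∧
        (∀ j ∈ List.range words.length, (dp.headD []).length ≤ (dp.getD j []).length) ∧
        (∀ w ∈ words, w ≠ "")))
instance (dp : List (List Int)) (min_words : List Int) (words : List String) : Decidable (Pre_restore_word dp min_words words) := by unfold Pre_restore_word; infer_instance

def pvWitness_restore_word : List (List Int) × List Int × List String :=
  ([[0, 0, 0]], [0, 9, 0], ["ab"])

def Spec_restore_word (dp : List (List Int)) (min_words : List Int) (words : List String) (out : String) : Prop := out = restore_word_alt dp min_words words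
instance (dp : List (List Int)) (min_words : List Int) (words : List String) (out : String) : Decidable (Spec_restore_word dp min_words words out) := by unfold Spec_restore_word; infer_instance

-- ===== CLAIM (what is proved, stated in full; the proofs are below) =====
def Claim_equal_restore_word : Prop := ∀ (dp : List (List Int)) (min_words : List Int) (words : List String), Dom_restore_word dp min_words words → Pre_restore_word dp min_words words → Spec_restore_word dp min_words words (restore_word dp min_words words)

-- ===== LEMMAS AND PROOFS =====

-- A's accumulator: result after prepending (in order) the words of `parts`
def pvConcatWS (parts : List String) : String :=
  parts.foldl (fun acc w => w ++ " " ++ acc) ""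

theorem pvConcatWS_append (parts : List String) (w : String) :
    pvConcatWS (parts ++ [w]) = w ++ " " ++ pvConcatWS parts := by
  simp [pvConcatWS]

theorem pvIsspace_space : PySem.Chars.isspace ' ' = true := by decide

theorem pvRstrip_append_space (x : List Char) :
    PySem.Chars.rstrip (x ++ [' ']) = PySem.Chars.rstrip x := by
  simp [PySem.Chars.rstrip, pvIsspace_space]

theorem pvStrip_append_space (x : List Char) :
    PySem.Chars.strip (x ++ [' ']) = PySem.Chars.strip x := by
  unfold PySem.Chars.strip PySem.Chars.lstrip
  rw [List.dropWhile_append]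
  by_cases h : (List.dropWhile PySem.Chars.isspace x).isEmpty
  · rw [List.isEmpty_iff] at h
    simp [List.dropWhile, pvIsspace_space, h]
  · simp [h, pvRstrip_append_space]

theorem pvConcatWS_toList (parts : List String) (h : parts ≠ []) :
    (pvConcatWS parts).toList
      = PySem.Chars.join [' '] (parts.reverse.map String.toList) ++ [' '] := by
  induction parts using List.reverseRecOn with
  | nil => exact absurd rfl h
  | append_singleton ps w ih =>
      rw [pvConcatWS_append]
      rcases hps : ps.reverse with _ | ⟨b, l⟩
      · have : ps = [] := by simpa using congrArg List.reverse hps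
        subst this
        simp [pvConcatWS, PySem.Chars.join_singleton]
      · have hne : ps ≠ [] := by
          intro hnil; rw [hnil] at hps; simp at hps
        rw [List.reverse_append]
        simp only [List.reverse_singleton, List.singleton_append, List.map_cons, hps]
        rw [PySem.Chars.join_cons_cons]
        have := ih hne
        rw [hps] at this
        simp [this]

theorem pvStrip_concat (parts : List String) :
    PySem.Str.strip (pvConcatWS parts)
      = PySem.Str.strip (PySem.Str.join " " parts.reverse) := by
  rcases eq_or_ne parts [] with h | h
  · subst h; rfl
  · unfold PySem.Str.strip
    rw [pvConcatWS_toList parts h, PySem.Str.toList_join]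
    have : ((" " : String).toList) = [' '] := rfl
    rw [this, pvStrip_append_space]

-- the descending index list [m-1, …, 0]
def pvDesc : Nat → List Int
  | 0 => []
  | k+1 => (k : Int) :: pvDesc k

theorem pvDesc_eq (m : Nat) :
    PySem.List.pyRange ((m : Int) - 1) (-1) (-1) = pvDesc m := by
  induction m with
  | zero => simp [pvDesc, PySem.List.pyRange_neg_one_eq_nil]
  | succ m ih =>
      rw [show ((m + 1 : Nat) : Int) - 1 = (m : Int) by push_cast; ring,
        PySem.List.pyRange_neg_one_cons (by omega)]
      rw [pvDesc, ih]

theorem pvLoop_zero (dp : List (List Int)) (min_words : List Int) (words : List String)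
    (f : Nat) (i : Int) (r : String) :
    restore_word_loop dp min_words words f i 0 r = r := by
  rw [restore_word_loop.eq_def]

theorem pvLoop_succ (dp : List (List Int)) (min_words : List Int) (words : List String)
    (f : Nat) (i : Int) (k : Nat) (r : String) :
    restore_word_loop dp min_words words f i (k+1) r =
      if 0 < i then
        if pvG2 dp (k : Int) i = PySem.List.pyGet? min_words i then
          match f, PySem.List.pyGet? words (k : Int) with
          | fk+1, some w =>
              restore_word_loop dp min_words words fk (i - PySem.Str.len w) words.length
                (w ++ " " ++ r)
          | _, _ => r
        else restore_word_loop dp min_words words f i k r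
      else r := by
  rw [restore_word_loop.eq_def]

theorem pvWalk_succ (words : List String) (choice : List (Option Int))
    (f : Nat) (i : Int) (parts : List String) :
    restore_word_walk words choice (f+1) i parts =
      if 0 < i then
        match PySem.List.pyGet? choice i with
        | some (some j) =>
          match PySem.List.pyGet? words j with
          | some w => restore_word_walk words choice f (i - PySem.Str.len w) (parts ++ [w])
          | none => parts
        | _ => parts
      else parts := by
  rw [restore_word_walk.eq_def]

-- A's inner scan: no hit in [jN-1 … 0] means the loop returns `result` unchanged
theorem pvScanA_none (dp : List (List Int)) (min_words : List Int) (words : List String)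
    (i : Int) (hi : 0 < i) (f : Nat) (result : String) :
    ∀ jN, List.find? (fun j => decide (pvG2 dp j i = PySem.List.pyGet? min_words i))
        (pvDesc jN) = none →
      restore_word_loop dp min_words words f i jN result = result := by
  intro jN
  induction jN with
  | zero => intro _; exact pvLoop_zero ..
  | succ k ih =>
      intro hf
      rw [pvDesc, List.find?_cons] at hf
      rw [pvLoop_succ, if_pos hi]
      by_cases hc : pvG2 dp (k : Int) i = PySem.List.pyGet? min_words i
      · rw [decide_eq_true hc] at hf; exact absurd hf (by simp)
      · rw [decide_eq_false hc] at hf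
        rw [if_neg hc]
        exact ih hf

-- A's inner scan: the first hit j (scanning j downward) triggers one matched step
theorem pvScanA_some (dp : List (List Int)) (min_words : List Int) (words : List String)
    (i : Int) (hi : 0 < i) (f : Nat) (result : String) (j : Int) :
    ∀ jN, List.find? (fun j => decide (pvG2 dp j i = PySem.List.pyGet? min_words i))
        (pvDesc jN) = some j →
      restore_word_loop dp min_words words f i jN result =
        match f, PySem.List.pyGet? words j with
        | fk+1, some w =>
            restore_word_loop dp min_words words fk (i - PySem.Str.len w) words.length
              (w ++ " " ++ result)
        | _, _ => result := by
  intro jN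
  induction jN with
  | zero => intro hf; exact absurd hf (by simp [pvDesc])
  | succ k ih =>
      intro hf
      rw [pvDesc, List.find?_cons] at hf
      rw [pvLoop_succ, if_pos hi]
      by_cases hc : pvG2 dp (k : Int) i = PySem.List.pyGet? min_words i
      · rw [decide_eq_true hc] at hf
        have hj : (k : Int) = j := by simpa using hf
        rw [if_pos hc, hj]
      · rw [decide_eq_false hc] at hf
        rw [if_neg hc]
        exact ih hf

-- choice-table lookup: choice[i] = _choice(dp, min_words, m, i) for 0 < i < n
theorem pvChoiceLookup (dp : List (List Int)) (min_words : List Int) (words : List String)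
    (n : Nat) (i : Int) (h0 : 0 < i) (hn : i < (n : Int)) :
    PySem.List.pyGet?
        ((none : Option Int) :: (PySem.List.pyRange 1 (n : Int) 1).map (pvChoiceAt dp min_words words.length)) i
      = some (pvChoiceAt dp min_words words.length i) := by
  obtain ⟨k, hk⟩ : ∃ k, i.toNat = k + 1 := ⟨i.toNat - 1, by omega⟩
  rw [PySem.List.pyGet?_of_nonneg _ (by omega), hk, List.getElem?_cons_succ,
    PySem.List.pyRange_one, List.getElem?_map, List.getElem?_map, List.getElem?_range
      (by omega : k < ((n : Int) - 1).toNat)]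
  simp only [Option.map_some]
  congr 2
  omega

theorem pvWalk_none (words : List String) (choice : List (Option Int))
    (f : Nat) (i : Int) (parts : List String) (hi : 0 < i)
    (hch : PySem.List.pyGet? choice i = some none) :
    restore_word_walk words choice (f+1) i parts = parts := by
  rw [pvWalk_succ, if_pos hi, hch]

theorem pvWalk_step (words : List String) (choice : List (Option Int))
    (f : Nat) (i : Int) (parts : List String) (j : Int) (hi : 0 < i)
    (hch : PySem.List.pyGet? choice i = some (some j)) :
    restore_word_walk words choice (f+1) i parts =
      match PySem.List.pyGet? words j with
      | some w => restore_word_walk words choice f (i - PySem.Str.len w) (parts ++ [w])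
      | none => parts := by
  rw [pvWalk_succ, if_pos hi, hch]

theorem pvMainEq (dp : List (List Int)) (min_words : List Int) (words : List String) (n : Nat) :
    ∀ (f : Nat) (i : Int) (result : String) (parts : List String), i < (n : Int) →
      result = pvConcatWS parts →
      PySem.Str.strip (restore_word_loop dp min_words words f i words.length result)
        = PySem.Str.strip (PySem.Str.join " "
            ((restore_word_walk words
                ((none : Option Int) :: (PySem.List.pyRange 1 (n : Int) 1).map (pvChoiceAt dp min_words words.length))
                f i parts).reverse)) := by
  intro f
  induction f with
  | zero =>
      intro i result parts hin hres
      have hl : restore_word_loop dp min_words words 0 i words.length result = result := by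
        by_cases hi : 0 < i
        · rcases hf : List.find? (fun j => decide (pvG2 dp j i = PySem.List.pyGet? min_words i))
              (pvDesc words.length) with _ | j
          · exact pvScanA_none dp min_words words i hi 0 result words.length hf
          · rw [pvScanA_some dp min_words words i hi 0 result j words.length hf]
        · cases hm : words.length with
          | zero => exact pvLoop_zero ..
          | succ k => rw [pvLoop_succ, if_neg hi]
      rw [hl, hres]
      exact pvStrip_concat parts
  | succ f ih =>
      intro i result parts hin hres
      by_cases hi : 0 < i
      · have hca : pvChoiceAt dp min_words words.length i
            = List.find? (fun j => decide (pvG2 dp j i = PySem.List.pyGet? min_words i))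
                (pvDesc words.length) := by
          rw [pvChoiceAt, pvDesc_eq]
        have hch := pvChoiceLookup dp min_words words n i hi hin
        rw [hca] at hch
        rcases hf : List.find? (fun j => decide (pvG2 dp j i = PySem.List.pyGet? min_words i))
            (pvDesc words.length) with _ | j
        · rw [hf] at hch
          rw [pvScanA_none dp min_words words i hi (f+1) result words.length hf,
            pvWalk_none words _ f i parts hi hch, hres]
          exact pvStrip_concat parts
        · rw [hf] at hch
          rw [pvScanA_some dp min_words words i hi (f+1) result j words.length hf,
            pvWalk_step words _ f i parts j hi hch]
          rcases hg : PySem.List.pyGet? words j with _ | w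
          · rw [hres]
            show PySem.Str.strip (pvConcatWS parts)
              = PySem.Str.strip (PySem.Str.join " " parts.reverse)
            exact pvStrip_concat parts
          · have hlen : (0 : Int) ≤ PySem.Str.len w := by
              rw [PySem.Str.len_eq]; exact Int.natCast_nonneg _
            rw [hres]
            show PySem.Str.strip (restore_word_loop dp min_words words f
                  (i - PySem.Str.len w) words.length (w ++ " " ++ pvConcatWS parts))
              = PySem.Str.strip (PySem.Str.join " "
                  ((restore_word_walk words
                      ((none : Option Int) :: (PySem.List.pyRange 1 (n : Int) 1).map (pvChoiceAt dp min_words words.length))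
                      f (i - PySem.Str.len w) (parts ++ [w])).reverse))
            exact ih (i - PySem.Str.len w) (w ++ " " ++ pvConcatWS parts) (parts ++ [w])
              (by omega) (pvConcatWS_append parts w).symm
      · have hl : restore_word_loop dp min_words words (f+1) i words.length result = result := by
          cases hm : words.length with
          | zero => exact pvLoop_zero ..
          | succ k => rw [pvLoop_succ, if_neg hi]
        rw [hl, pvWalk_succ, if_neg hi, hres]
        exact pvStrip_concat parts

-- ===== VERDICT (by name: the statement is the Claim_ definition above) =====
theorem restore_word_spec : Claim_equal_restore_word := by
  intro dp min_words words _ hPre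
  unfold Spec_restore_word
  obtain ⟨hne, -⟩ := hPre
  match dp with
  | [] => exact absurd rfl hne
  | row0 :: rest =>
      show restore_word (row0 :: rest) min_words words = restore_word_alt (row0 :: rest) min_words words
      unfold restore_word restore_word_alt
      exact pvMainEq (row0 :: rest) min_words words row0.length row0.length
        ((row0.length : Int) - 1) "" [] (by omega) rfl
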